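-- pv_equiv track=rewrite | github.com/marin-community/marin | scripts/gdn/gdnctl.py | _last_iteration_bounds
-- ===== SOURCE A (Python) =====
-- from collections.abc import Generator, Sequence
--
-- def _last_iteration_bounds(lines: Sequence[str]) -> tuple[int, int] | None:
--     last_start = None
--     for idx, line in enumerate(lines):
--         if line.startswith("### Iteration "):
--             last_start = idx
--     if last_start is None:
--         return None
--     return last_start, len(lines)
-- ===== SOURCE B (Python) =====
-- def _last_iteration_bounds(lines):
--     for idx in range(len(lines) - 1, -1, -1):
--         if lines[idx].startswith("### Iteration "):
--             return idx, len(lines)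
--     return None
-- ===== Notes on version B (the rewrite author's own statement) =====
-- stated objective: idiomatic
-- what changed: Replaces the forward full scan that overwrites last_start with a reverse index loop that returns at the first (i.e. last) matching line.
import Mathlib
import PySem

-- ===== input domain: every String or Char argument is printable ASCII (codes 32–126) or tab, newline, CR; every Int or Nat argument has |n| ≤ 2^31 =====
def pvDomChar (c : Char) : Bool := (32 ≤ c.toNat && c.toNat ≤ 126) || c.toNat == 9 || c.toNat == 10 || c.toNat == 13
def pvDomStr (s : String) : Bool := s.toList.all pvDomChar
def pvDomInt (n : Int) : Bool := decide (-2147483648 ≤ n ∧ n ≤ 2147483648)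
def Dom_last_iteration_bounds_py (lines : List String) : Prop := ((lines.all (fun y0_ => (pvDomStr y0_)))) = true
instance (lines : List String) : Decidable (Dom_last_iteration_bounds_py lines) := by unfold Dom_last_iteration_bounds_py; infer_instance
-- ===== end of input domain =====

-- B replaces A's forward scan that overwrites last_start with a reverse index loop
-- returning at the first (i.e. last) matching line; same return value everywhere.

-- ===== PORT A =====
def last_iteration_bounds_py (lines : List String) : Option (Int × Int) :=
  let last_start : Option Int :=
    (PySem.List.enumerate lines 0).foldl
      (fun acc p => if PySem.Str.startswith p.2 "### Iteration " then some p.1 else acc)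
      none
  match last_start with
  | none => none
  | some i => (i, (lines.length : Int))

-- ===== PORT B =====
-- reverse loop: bLoop lines len n scans indices n-1, n-2, …, 0 (= range(n-1,-1,-1))
def bLoop (lines : List String) (len : Int) : Nat → Option (Int × Int)
  | 0 => none
  | n+1 =>
    if PySem.Str.startswith (lines.getD n "") "### Iteration " then some ((n : Int), len)
    else bLoop lines len n

def last_iteration_bounds_py_alt (lines : List String) : Option (Int × Int) :=
  bLoop lines (lines.length : Int) lines.length

-- ===== PRECONDITION & SPEC =====
def Spec_last_iteration_bounds_py (lines : List String) (out : Option (Int × Int)) : Prop := out = last_iteration_bounds_py_alt lines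
instance (lines : List String) (out : Option (Int × Int)) : Decidable (Spec_last_iteration_bounds_py lines out) := by unfold Spec_last_iteration_bounds_py; infer_instance

-- ===== CLAIM (what is proved, stated in full; the proofs are below) =====
def Claim_equal_last_iteration_bounds_py : Prop := ∀ (lines : List String), Dom_last_iteration_bounds_py lines → Spec_last_iteration_bounds_py lines (last_iteration_bounds_py lines)

-- ===== LEMMAS AND PROOFS =====

-- ===== VERDICT (by name: the statement is the Claim_ definition above) =====
-- bLoop only inspects indices < n, so appending past them changes nothing
theorem bLoop_append (l : List String) (x : String) (L : Int) :
    ∀ n, n ≤ l.length → bLoop (l ++ [x]) L n = bLoop l L n := by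
  intro n
  induction n with
  | zero => intro _; rfl
  | succ m ih =>
    intro h
    have hm : m < l.length := Nat.lt_of_succ_le h
    rw [bLoop, bLoop, List.getD_append l [x] "" m hm, ih (Nat.le_of_lt hm)]

theorem core_eq (l : List String) : ∀ L : Int,
    ((PySem.List.enumerate l 0).foldl
      (fun acc p => if PySem.Str.startswith p.2 "### Iteration " then some p.1 else acc)
      none).map (fun i => (i, L)) = bLoop l L l.length := by
  induction l using List.reverseRecOn with
  | nil => intro L; rfl
  | append_singleton l x ih =>
    intro L
    rw [PySem.List.enumerate_append]
    simp only [List.foldl_append, List.length_append, List.length_singleton,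
      PySem.List.enumerate, List.foldl_cons, List.foldl_nil]
    rw [show l.length + 1 = Nat.succ l.length from rfl, bLoop,
      List.getD_append_right l [x] "" l.length (Nat.le_refl _), Nat.sub_self]
    rw [List.getD_cons_zero]
    by_cases hp : PySem.Str.startswith x "### Iteration " = true
    · rw [if_pos hp, if_pos hp]
      simp
    · rw [if_neg hp, if_neg hp, bLoop_append l x L l.length (Nat.le_refl _)]
      exact ih L

theorem last_iteration_bounds_py_spec : Claim_equal_last_iteration_bounds_py := by
  intro lines _
  unfold Spec_last_iteration_bounds_py last_iteration_bounds_py last_iteration_bounds_py_alt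
  rw [← core_eq lines (lines.length : Int)]
  cases h : (PySem.List.enumerate lines 0).foldl
      (fun acc p => if PySem.Str.startswith p.2 "### Iteration " then some p.1 else acc) none <;>
    simp
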